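-- pv_equiv track=rewrite | github.com/chminipark/algorithm | Programmers/코딩테스트 고득점 Kit/Heap(scoville).py | solution
-- ===== SOURCE A (Python) =====
-- def solution(scoville, K):
--     import heapq
--     heapq.heapify(scoville)
--     answer = 0
--
--     while len(scoville) > 1:
--         first = heapq.heappop(scoville)
--         if first >= K:
--             break
--         second = heapq.heappop(scoville)
--         mix = first + (second * 2)
--         heapq.heappush(scoville, mix)
--         answer += 1
--
--     if scoville[0] >= K:
--         return answer
--     else:
--         return -1
-- ===== SOURCE B (Python) =====
-- # B: no heap and no ordering maintained at all -- the working list stays unsorted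
-- # and each round finds the minimum by a plain linear scan over enumerate, pops it
-- # by index, scans again, pops, and appends the mix at the end.
-- # A mutates scoville in place (heapify/push/pop); B copies it and leaves the
-- # argument untouched -- the equivalence claimed here is about the return value only.
-- def solution(scoville, K):
--     xs = list(scoville)
--     answer = 0
--     while len(xs) > 1:
--         i, first = 0, xs[0]
--         for j, v in enumerate(xs):
--             if v < first:
--                 i, first = j, v
--         if first >= K:
--             break
--         xs.pop(i)
--         i, second = 0, xs[0]
--         for j, v in enumerate(xs):
--             if v < second:
--                 i, second = j, v
--         xs.pop(i)
--         xs.append(first + 2 * second)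
--         answer += 1
--     return answer if min(xs) >= K else -1
-- ===== Notes on version B (the rewrite author's own statement) =====
-- stated objective: alternative
-- what changed: B drops heapq entirely: it keeps the working list unsorted and each round finds the minimum by a linear enumerate scan, pops it by index, scans again for the second minimum, pops, and appends the mix at the end; B also does not mutate the scoville argument (the claim is about the return value).
import Mathlib
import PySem

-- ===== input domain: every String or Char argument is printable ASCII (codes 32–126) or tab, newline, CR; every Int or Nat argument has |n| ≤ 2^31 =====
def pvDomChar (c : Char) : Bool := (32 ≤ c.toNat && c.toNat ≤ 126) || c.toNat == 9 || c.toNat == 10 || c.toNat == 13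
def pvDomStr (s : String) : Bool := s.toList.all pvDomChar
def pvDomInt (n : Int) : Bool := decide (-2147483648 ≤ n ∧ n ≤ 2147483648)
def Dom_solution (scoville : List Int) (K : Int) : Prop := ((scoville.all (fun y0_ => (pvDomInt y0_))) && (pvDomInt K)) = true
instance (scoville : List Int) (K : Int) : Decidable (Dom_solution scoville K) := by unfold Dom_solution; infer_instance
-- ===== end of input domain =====

-- B replaces A's heap by an UNSORTED working list scanned linearly for its minimum each
-- round (pop by index, append the mix at the end); A mutates scoville in place (heapify),
-- B copies it — the equivalence proved here is about the return value only.

-- ===== PORT A =====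
-- heapq at the value level: heappop returns the minimum value and removes one
-- occurrence of it; heappush appends to the multiset.  fuel = current length
-- (each iteration shrinks the list by exactly one).
def solHeapLoop (K : Int) : Nat → List Int → Int → (List Int × Int)
  | 0, l, ans => (l, ans)
  | fuel+1, l, ans =>
    if 1 < l.length then
      match PySem.List.min? l (fun x => x) with
      | some first =>
        if first ≥ K then (l.erase first, ans)
        else
          match PySem.List.min? (l.erase first) (fun x => x) with
          | some second =>
              solHeapLoop K fuel ((l.erase first).erase second ++ [first + second * 2]) (ans + 1)
          | none => (l.erase first, ans)
      | none => (l, ans)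
    else (l, ans)

-- scoville[0] on a heap is its minimum; on the empty list Python raises IndexError
-- (excluded by Pre_solution), the -1 there is an arbitrary total value.
def heapFinish (K : Int) (p : List Int × Int) : Int :=
  match PySem.List.min? p.1 (fun x => x) with
  | some m => if m ≥ K then p.2 else -1
  | none => -1

def solution (scoville : List Int) (K : Int) : Int :=
  heapFinish K (solHeapLoop K scoville.length scoville 0)

-- ===== PORT B =====
-- 'i, m = 0, xs[0]; for j, v in enumerate(xs): if v < m: i, m = j, v'
def bScan (xs : List Int) (h0 : Int) : Int × Int :=
  (PySem.List.enumerate xs 0).foldl (fun im jv => if jv.2 < im.2 then jv else im) (0, h0)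

-- B's while loop; fuel = current length (each iteration is a net loss of one element).
def solAltLoop (K : Int) : Nat → List Int → Int → (List Int × Int)
  | 0, xs, ans => (xs, ans)
  | fuel+1, xs, ans =>
    if 1 < xs.length then
      match PySem.List.pyGet? xs 0 with
      | some h0 =>
        let p1 := bScan xs h0
        if p1.2 ≥ K then (xs, ans)
        else
          match PySem.List.pop? xs p1.1 with
          | some (_, xs1) =>
            match PySem.List.pyGet? xs1 0 with
            | some h1 =>
              let p2 := bScan xs1 h1
              match PySem.List.pop? xs1 p2.1 with
              | some (_, xs2) => solAltLoop K fuel (xs2 ++ [p1.2 + 2 * p2.2]) (ans + 1)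
              | none => (xs, ans)   -- unreachable: the scan index is in range
            | none => (xs, ans)     -- unreachable: len > 1 before the first pop
          | none => (xs, ans)       -- unreachable: the scan index is in range
      | none => (xs, ans)           -- unreachable under the length guard
    else (xs, ans)

-- 'return answer if min(xs) >= K else -1'; min([]) raises ValueError (excluded by
-- Pre_solution), the -1 there is an arbitrary total value.
def altFinish (K : Int) (p : List Int × Int) : Int :=
  match PySem.List.min? p.1 (fun x => x) with
  | some m => if m ≥ K then p.2 else -1
  | none => -1

def solution_alt (scoville : List Int) (K : Int) : Int :=
  altFinish K (solAltLoop K scoville.length scoville 0)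

-- ===== PRECONDITION & SPEC =====
-- Pre_ excludes only the empty list, on which both Pythons raise (IndexError / ValueError).
def Pre_solution (scoville : List Int) (K : Int) : Prop := scoville ≠ []
instance (scoville : List Int) (K : Int) : Decidable (Pre_solution scoville K) := by
  unfold Pre_solution; infer_instance

def pvWitness_solution : List Int × Int := ([1, 2, 3, 9, 10, 12], 7)

def Spec_solution (scoville : List Int) (K : Int) (out : Int) : Prop := out = solution_alt scoville K
instance (scoville : List Int) (K : Int) (out : Int) : Decidable (Spec_solution scoville K out) := by
  unfold Spec_solution; infer_instance

-- ===== CLAIM (what is proved, stated in full; the proofs are below) =====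
def Claim_equal_solution : Prop := ∀ (scoville : List Int) (K : Int), Dom_solution scoville K → Pre_solution scoville K → Spec_solution scoville K (solution scoville K)

-- ===== LEMMAS AND PROOFS =====

-- the enumerate fold keeps a running (index, value) pair; invariant of one pass
theorem scan_go (xs : List Int) : ∀ (s i0 : Int) (m0 : Int),
    let r := (PySem.List.enumerate xs s).foldl (fun im jv => if jv.2 < im.2 then jv else im) (i0, m0)
    r.2 ≤ m0 ∧ (∀ y ∈ xs, r.2 ≤ y) ∧
      ((r = (i0, m0)) ∨ ∃ k : Nat, ∃ hk : k < xs.length,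
        r.1 = s + (k : Int) ∧ xs[k] = r.2 ∧ r.2 < m0 ∧ ∀ j, (hj : j < k) → r.2 < xs[j]) := by
  induction xs with
  | nil => intro s i0 m0; simp [PySem.List.enumerate_nil]
  | cons x t ih =>
    intro s i0 m0
    rw [PySem.List.enumerate_cons]
    simp only [List.foldl_cons]
    by_cases hx : x < m0
    · simp only [hx, if_pos]
      obtain ⟨h1, h2, h3⟩ := ih (s + 1) s x
      refine ⟨le_of_lt (lt_of_le_of_lt h1 hx), ?_, ?_⟩
      · intro y hy
        rcases List.mem_cons.mp hy with rfl | hy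
        · exact h1
        · exact h2 y hy
      · rcases h3 with h | ⟨k, hk, hik, hvk, hlt, hpre⟩
        · refine Or.inr ⟨0, by simp, ?_, ?_, ?_, ?_⟩
          · rw [h]; simp
          · rw [h]; simp
          · rw [h]; exact hx
          · intro j hj; omega
        · refine Or.inr ⟨k + 1, by simpa using Nat.succ_lt_succ hk, by rw [hik]; push_cast; ring, by simpa using hvk, lt_trans hlt hx, ?_⟩
          intro j hj
          match j with
          | 0 => simpa using hlt
          | j'+1 => simpa using hpre j' (by omega)
    · simp only [hx, if_false]
      obtain ⟨h1, h2, h3⟩ := ih (s + 1) i0 m0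
      refine ⟨h1, ?_, ?_⟩
      · intro y hy
        rcases List.mem_cons.mp hy with rfl | hy
        · exact le_trans h1 (not_lt.mp hx)
        · exact h2 y hy
      · rcases h3 with h | ⟨k, hk, hik, hvk, hlt, hpre⟩
        · exact Or.inl h
        · refine Or.inr ⟨k + 1, by simpa using Nat.succ_lt_succ hk, by rw [hik]; push_cast; ring, by simpa using hvk, hlt, ?_⟩
          intro j hj
          match j with
          | 0 => simpa using lt_of_lt_of_le hlt (not_lt.mp hx)
          | j'+1 => simpa using hpre j' (by omega)

-- the full scan on a nonempty list: the result is a first-minimum (index, value) pair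
theorem bScan_spec (x : Int) (t : List Int) :
    ∃ k : Nat, ∃ hk : k < (x :: t).length,
      (bScan (x :: t) x).1 = (k : Int) ∧ (x :: t)[k] = (bScan (x :: t) x).2 ∧
      (∀ j, (hj : j < k) → (bScan (x :: t) x).2 < (x :: t)[j]) ∧
      (∀ y ∈ x :: t, (bScan (x :: t) x).2 ≤ y) := by
  obtain ⟨h1, h2, h3⟩ := scan_go (x :: t) 0 0 x
  rcases h3 with h | ⟨k, hk, hik, hvk, _, hpre⟩
  · exact ⟨0, by simp, by rw [bScan, h]; simp, by rw [bScan, h]; simp, by intro j hj; omega, h2⟩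
  · exact ⟨k, hk, by rw [bScan, hik]; simp, hvk, hpre, h2⟩

-- erasing the value found at the first-minimum index is eraseIdx there
theorem erase_eq_eraseIdx_of_first (xs : List Int) (k : Nat) (hk : k < xs.length)
    (hpre : ∀ j, (hj : j < k) → xs[k] ≠ xs[j]) :
    xs.erase xs[k] = xs.eraseIdx k := by
  induction xs generalizing k with
  | nil => simp at hk
  | cons x t ih =>
    match k with
    | 0 => simp
    | k'+1 =>
      have hx0 := hpre 0 (by omega)
      have hx : x ≠ (x :: t)[k' + 1] := by
        simp only [List.getElem_cons_zero] at hx0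
        exact fun e => hx0 e.symm
      rw [List.erase_cons_tail (by simpa using hx), List.eraseIdx_cons_succ]
      congr 1
      have := ih k' (by simpa using hk) ?_
      · simpa using this
      · intro j hj
        have := hpre (j + 1) (by omega)
        simpa using this

-- one scan-and-pop of B equals one heappop of A: same popped value, same remaining list
theorem scanPop_eq (x : Int) (t : List Int) :
    PySem.List.min? (x :: t) (fun y => y) = some (bScan (x :: t) x).2 ∧
    PySem.List.pop? (x :: t) (bScan (x :: t) x).1 =
      some ((bScan (x :: t) x).2, (x :: t).erase (bScan (x :: t) x).2) := by
  obtain ⟨k, hk, hik, hvk, hpre, hall⟩ := bScan_spec x t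
  have hmin : PySem.List.min? (x :: t) (fun y => y) = some (bScan (x :: t) x).2 := by
    obtain ⟨m, hm⟩ : ∃ m, PySem.List.min? (x :: t) (fun y => y) = some m := by
      cases h : PySem.List.min? (x :: t) (fun y => y) with
      | none => exact absurd ((PySem.List.min?_eq_none_iff (x :: t) _).mp h) (by simp)
      | some m => exact ⟨m, rfl⟩
    have h1 : (bScan (x :: t) x).2 ≤ m := hall m (PySem.List.min?_mem hm)
    have h2 : m ≤ (bScan (x :: t) x).2 := by
      have := PySem.List.min?_isMin hm (bScan (x :: t) x).2 (hvk ▸ List.getElem_mem hk)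
      simpa using this
    rw [hm, le_antisymm h2 h1]
  refine ⟨hmin, ?_⟩
  rw [hik, PySem.List.pop?_natCast (x :: t) k (by simpa using hk)]
  have he : (x :: t).erase (bScan (x :: t) x).2 = (x :: t).eraseIdx k := by
    rw [← hvk]
    exact erase_eq_eraseIdx_of_first (x :: t) k hk
      (fun j hj => by rw [hvk]; exact ne_of_lt (hpre j hj))
  rw [he, hvk]

-- the two loops agree after finishing (same remaining minimum, same answer)
theorem loop_agree (K : Int) (fuel : Nat) : ∀ (xs : List Int) (ans : Int),
    altFinish K (solAltLoop K fuel xs ans) = heapFinish K (solHeapLoop K fuel xs ans) := by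
  induction fuel with
  | zero => intro xs ans; rfl
  | succ n ih =>
    intro xs ans
    by_cases hlen : 1 < xs.length
    · match xs with
      | [] => simp at hlen
      | x :: t =>
        obtain ⟨hmin, hpop⟩ := scanPop_eq x t
        have hget : PySem.List.pyGet? (x :: t) 0 = some x := by
          simp [PySem.List.pyGet?, PySem.List.pyIdx?]
        simp only [solAltLoop, solHeapLoop, hlen, if_true, hget, hmin, hpop]
        set m := (bScan (x :: t) x).2 with hm
        by_cases hK : m ≥ K
        · simp only [hK, if_true]
          -- A pops the minimum before breaking; its new minimum is still ≥ K
          unfold altFinish heapFinish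
          simp only [hmin, hK, if_true]
          match ht : (x :: t).erase m with
          | [] =>
            exact absurd trivial (by
              intro _
              have hmem : m ∈ x :: t := PySem.List.min?_mem hmin
              have h0 : ((x :: t).erase m).length = 0 := by rw [ht]; rfl
              rw [List.length_erase_of_mem hmem] at h0
              simp only [List.length_cons] at h0 hlen
              omega)
          | y :: t' =>
            obtain ⟨m', hm'⟩ : ∃ m', PySem.List.min? (y :: t') (fun z => z) = some m' := by
              cases h : PySem.List.min? (y :: t') (fun z => z) with
              | none => exact absurd ((PySem.List.min?_eq_none_iff (y :: t') _).mp h) (by simp)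
              | some m' => exact ⟨m', rfl⟩
            have hmem : m' ∈ x :: t := by
              have := PySem.List.min?_mem hm'
              rw [← ht] at this
              exact (List.erase_sublist).subset this
            have : K ≤ m' := le_trans hK (by
              have := PySem.List.min?_isMin hmin m' hmem; simpa using this)
            simp [hm', this]
        · simp only [hK, if_false]
          match ht : (x :: t).erase m with
          | [] =>
            exact absurd trivial (by
              intro _
              have hmem : m ∈ x :: t := PySem.List.min?_mem hmin
              have h0 : ((x :: t).erase m).length = 0 := by rw [ht]; rfl
              rw [List.length_erase_of_mem hmem] at h0
              simp only [List.length_cons] at h0 hlen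
              omega)
          | y :: t' =>
            obtain ⟨hmin2, hpop2⟩ := scanPop_eq y t'
            have hget2 : PySem.List.pyGet? (y :: t') 0 = some y := by
              simp [PySem.List.pyGet?, PySem.List.pyIdx?]
            simp only [hget2, hmin2, hpop2]
            rw [show (bScan (x :: t) x).2 + 2 * (bScan (y :: t') y).2
                  = (bScan (x :: t) x).2 + (bScan (y :: t') y).2 * 2 by ring]
            exact ih _ _
    · simp only [solAltLoop, solHeapLoop, hlen, if_false]; rfl

-- ===== VERDICT (by name: the statement is the Claim_ definition above) =====
theorem solution_spec : Claim_equal_solution := by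
  intro scoville K _ _
  unfold Spec_solution solution solution_alt
  exact (loop_agree K scoville.length scoville 0).symm
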